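-- pv_equiv track=rewrite | github.com/Amizhthan171/NER | concat_df.py | preprocess_text_for_empty_columns
-- ===== SOURCE A (Python) =====
-- def preprocess_text_for_empty_columns(extracted_text):
--     # Replace blank columns with "0 dollars"
--     lines = extracted_text.split("\n")
--     modified_lines = []
--     for line in lines:
--         # Split the line by tabs (assuming columns are separated by tabs)
--         columns = line.split("\t")
--         modified_columns = []
--         for column in columns:
--             # If the column is empty or contains only whitespace, replace with "0 dollars"
--             if not column.strip():
--                 modified_columns.append("0 dollars")
--             else:
--                 modified_columns.append(column)
--         # Join the modified columns back into a line
--         modified_line = "\t".join(modified_columns)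
--         modified_lines.append(modified_line)
--
--     # Join the modified lines back into the preprocessed text
--     preprocessed_text = "\n".join(modified_lines)
--     return preprocessed_text
-- ===== SOURCE B (Python) =====
-- def preprocess_text_for_empty_columns(extracted_text):
--     # Single left-to-right scan over the characters: accumulate the current
--     # field; on a delimiter (tab/newline) emit the field (or "0 dollars" if it
--     # was blank) followed by the delimiter.  No intermediate lists of lines
--     # and columns are built.
--     out = []
--     field = []
--     blank = True
--     for ch in extracted_text:
--         if ch == "\t" or ch == "\n":
--             out.extend("0 dollars" if blank else field)
--             out.append(ch)
--             field = []
--             blank = True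
--         else:
--             field.append(ch)
--             blank = blank and ch.isspace()
--     out.extend("0 dollars" if blank else field)
--     return "".join(out)
-- ===== Notes on version B (the rewrite author's own statement) =====
-- stated objective: alternative
-- what changed: Replaces the nested split-lines/split-columns/strip/join passes with one left-to-right character scan that emits each field and delimiter directly, tracking the field's blankness with a boolean flag instead of calling strip on every column.
import Mathlib
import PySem

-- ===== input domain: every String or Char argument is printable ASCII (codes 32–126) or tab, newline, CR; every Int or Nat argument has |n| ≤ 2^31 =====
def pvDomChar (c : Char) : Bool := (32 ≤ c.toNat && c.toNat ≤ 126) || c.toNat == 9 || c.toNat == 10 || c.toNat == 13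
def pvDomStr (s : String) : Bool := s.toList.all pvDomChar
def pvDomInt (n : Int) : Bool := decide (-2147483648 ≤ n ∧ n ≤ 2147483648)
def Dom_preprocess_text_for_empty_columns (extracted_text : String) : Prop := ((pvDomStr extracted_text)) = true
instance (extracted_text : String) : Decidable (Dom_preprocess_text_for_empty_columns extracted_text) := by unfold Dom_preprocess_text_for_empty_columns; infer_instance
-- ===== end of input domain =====

-- B replaces A's nested split/strip/join passes with a single left-to-right character
-- scan emitting fields and delimiters directly (objective: alternative, same cost).

-- ===== PORT A =====
def preprocess_text_for_empty_columns (extracted_text : String) : String :=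
  let lines := PySem.Chars.splitOn extracted_text.toList ['\n']
  let modified_lines := lines.foldl (fun acc line =>
    let columns := PySem.Chars.splitOn line ['\t']
    let modified_columns := columns.foldl (fun acc2 column =>
      if PySem.Chars.strip column = [] then acc2 ++ ["0 dollars".toList]
      else acc2 ++ [column]) []
    let modified_line := PySem.Chars.join ['\t'] modified_columns
    acc ++ [modified_line]) []
  String.mk (PySem.Chars.join ['\n'] modified_lines)

-- ===== PORT B =====
-- state = (output chars so far, current field chars, field-is-blank flag)
def pvAltStep (st : List Char × List Char × Bool) (ch : Char) : List Char × List Char × Bool :=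
  if ch = '\t' ∨ ch = '\n' then
    (st.1 ++ (if st.2.2 then "0 dollars".toList else st.2.1) ++ [ch], [], true)
  else
    (st.1, st.2.1 ++ [ch], st.2.2 && PySem.Chars.isspace ch)

def preprocess_text_for_empty_columns_alt (extracted_text : String) : String :=
  let st := extracted_text.toList.foldl pvAltStep ([], [], true)
  String.mk (st.1 ++ (if st.2.2 then "0 dollars".toList else st.2.1))

-- ===== PRECONDITION & SPEC =====
def Spec_preprocess_text_for_empty_columns (extracted_text : String) (out : String) : Prop := out = preprocess_text_for_empty_columns_alt extracted_text
instance (extracted_text : String) (out : String) : Decidable (Spec_preprocess_text_for_empty_columns extracted_text out) := by unfold Spec_preprocess_text_for_empty_columns; infer_instance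

-- ===== CLAIM (what is proved, stated in full; the proofs are below) =====
def Claim_equal_preprocess_text_for_empty_columns : Prop := ∀ (extracted_text : String), Dom_preprocess_text_for_empty_columns extracted_text → Spec_preprocess_text_for_empty_columns extracted_text (preprocess_text_for_empty_columns extracted_text)

-- ===== LEMMAS AND PROOFS =====

def pvDollars : List Char := "0 dollars".toList

-- spec-level single-delimiter splitter (proof helper; = PySem.Chars.splitOn · [d])
def pvSplit (d : Char) (p : List Char) : List Char → List (List Char)
  | [] => [p]
  | c :: cs => if c = d then p :: pvSplit d [] cs else pvSplit d (p ++ [c]) cs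

def pvFCol (col : List Char) : List Char :=
  if PySem.Chars.strip col = [] then pvDollars else col

def pvGLine (line : List Char) : List Char :=
  PySem.Chars.join ['\t'] ((pvSplit '\t' [] line).map pvFCol)

def pvAn (cs : List Char) : List Char :=
  PySem.Chars.join ['\n'] ((pvSplit '\n' [] cs).map pvGLine)

-- B-side recursive view of the fold
def pvGf (field : List Char) (blank : Bool) : List Char → List Char
  | [] => if blank then pvDollars else field
  | c :: cs =>
    if c = '\t' ∨ c = '\n' then
      (if blank then pvDollars else field) ++ c :: pvGf [] true cs
    else pvGf (field ++ [c]) (blank && PySem.Chars.isspace c) cs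

theorem pvGo_eq (d : Char) : ∀ (l : List Char) (fuel : Nat) (cur : List Char)
    (acc : List (List Char)), l.length ≤ fuel →
    PySem.Chars.splitOn.go [d] fuel l cur acc = acc.reverse ++ pvSplit d cur.reverse l := by
  intro l
  induction l with
  | nil =>
    intro fuel cur acc _
    cases fuel <;> simp [PySem.Chars.splitOn.go, pvSplit]
  | cons c rest ih =>
    intro fuel cur acc hlen
    cases fuel with
    | zero => simp at hlen
    | succ fuel =>
      by_cases hc : c = d
      · subst hc
        have : [c].isPrefixOf (c :: rest) = true := by simp [List.isPrefixOf]
        simp only [PySem.Chars.splitOn.go, this, if_pos, List.length_cons, List.length_nil,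
          List.drop_succ_cons, List.drop_zero]
        rw [ih fuel [] (cur.reverse :: acc) (by simpa using Nat.le_of_succ_le_succ hlen)]
        simp [pvSplit]
      · have : [d].isPrefixOf (c :: rest) = false := by
          simp [List.isPrefixOf]; exact fun h => (hc h.symm).elim
        simp only [PySem.Chars.splitOn.go, this, Bool.false_eq_true, if_false]
        rw [ih fuel (c :: cur) acc (by simpa using Nat.le_of_succ_le_succ hlen)]
        simp [pvSplit, hc]

theorem pvSplitOn_eq (d : Char) (s : List Char) :
    PySem.Chars.splitOn s [d] = pvSplit d [] s := by
  have := pvGo_eq d s (s.length + 1) [] [] (by omega)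
  simpa [PySem.Chars.splitOn] using this

theorem pvSplit_ne_nil (d : Char) (p : List Char) (l : List Char) :
    pvSplit d p l ≠ [] := by
  induction l generalizing p with
  | nil => simp [pvSplit]
  | cons c cs ih => by_cases hc : c = d <;> simp [pvSplit, hc, ih]

theorem pvSplit_modifyHead (d : Char) (l : List Char) : ∀ p,
    pvSplit d p l = (pvSplit d [] l).modifyHead (p ++ ·) := by
  induction l with
  | nil => intro p; simp [pvSplit]
  | cons c cs ih =>
    intro p
    by_cases hc : c = d
    · simp [pvSplit, hc]
    · simp only [pvSplit, hc, if_false, List.nil_append]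
      rw [ih (p ++ [c]), ih [c]]
      obtain ⟨h, t, ht⟩ : ∃ h t, pvSplit d [] cs = h :: t := by
        cases hs : pvSplit d [] cs with
        | nil => exact absurd hs (pvSplit_ne_nil d [] cs)
        | cons h t => exact ⟨h, t, rfl⟩
      simp [ht]

theorem pvSplit_prefix (d : Char) (l1 : List Char) (h : ∀ c ∈ l1, c ≠ d) :
    ∀ p cs, pvSplit d p (l1 ++ cs) = pvSplit d (p ++ l1) cs := by
  induction l1 with
  | nil => intro p cs; simp
  | cons c rest ih =>
    intro p cs
    have hc : c ≠ d := h c (by simp)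
    simp only [List.cons_append, pvSplit, hc, if_false]
    rw [ih (fun x hx => h x (by simp [hx])) (p ++ [c]) cs]
    simp

theorem pvStrip_nil_iff (l : List Char) :
    PySem.Chars.strip l = [] ↔ l.all PySem.Chars.isspace = true := by
  constructor
  · intro h
    have h1 : (PySem.Chars.lstrip l).reverse.all PySem.Chars.isspace = true := by
      have := h
      simp only [PySem.Chars.strip, PySem.Chars.rstrip, List.reverse_eq_nil_iff] at this
      rw [List.dropWhile_eq_nil_iff] at this
      simpa [List.all_eq_true] using this
    have h2 : (List.dropWhile PySem.Chars.isspace l).all PySem.Chars.isspace = true := by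
      simpa [PySem.Chars.lstrip, List.all_eq_true] using h1
    have := List.takeWhile_append_dropWhile (p := PySem.Chars.isspace) (l := l)
    rw [← this, List.all_append, h2, Bool.and_true]
    simp only [List.all_eq_true]
    intro x hx
    exact List.mem_takeWhile_imp hx
  · intro h
    have h1 : PySem.Chars.lstrip l = [] := by
      simp only [PySem.Chars.lstrip, List.dropWhile_eq_nil_iff]
      intro x hx; exact List.all_eq_true.mp h x hx
    simp [PySem.Chars.strip, h1, PySem.Chars.rstrip]

theorem pvJoin_singleton (d : Char) (a : List Char) :
    PySem.Chars.join [d] [a] = a := by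
  simp [PySem.Chars.join, List.intercalate]

theorem pvJoin_cons_cons (d : Char) (a b : List Char) (r : List (List Char)) :
    PySem.Chars.join [d] (a :: b :: r) = a ++ d :: PySem.Chars.join [d] (b :: r) := by
  simp [PySem.Chars.join, List.intercalate, List.intersperse]

theorem pvGLine_free (field : List Char) (hfree : ∀ c ∈ field, c ≠ '\t') :
    pvGLine field = pvFCol field := by
  unfold pvGLine
  have : pvSplit '\t' [] field = [field] := by
    have := pvSplit_prefix '\t' field hfree [] []
    simpa [pvSplit] using this
  rw [this, List.map_cons, List.map_nil, pvJoin_singleton]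

theorem pvJoin_head (d : Char) (a b : List Char) (r : List (List Char)) :
    PySem.Chars.join [d] ((a ++ b) :: r) = a ++ PySem.Chars.join [d] (b :: r) := by
  cases r with
  | nil => rw [pvJoin_singleton, pvJoin_singleton]
  | cons x xs => rw [pvJoin_cons_cons, pvJoin_cons_cons]; simp

theorem pvAn_free (field : List Char)
    (hfree : ∀ c ∈ field, c ≠ '\t' ∧ c ≠ '\n') :
    pvAn field = pvFCol field := by
  unfold pvAn
  have : pvSplit '\n' [] field = [field] := by
    have := pvSplit_prefix '\n' field (fun c hc => (hfree c hc).2) [] []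
    simpa [pvSplit] using this
  rw [this, List.map_cons, List.map_nil, pvJoin_singleton]
  exact pvGLine_free field (fun c hc => (hfree c hc).1)

theorem pvAn_newline (field cs : List Char)
    (hfree : ∀ c ∈ field, c ≠ '\t' ∧ c ≠ '\n') :
    pvAn (field ++ '\n' :: cs) = pvFCol field ++ '\n' :: pvAn cs := by
  unfold pvAn
  rw [pvSplit_prefix '\n' field (fun c hc => (hfree c hc).2) [] ('\n' :: cs)]
  simp only [List.nil_append, pvSplit, reduceIte]
  obtain ⟨h, t, ht⟩ : ∃ h t, pvSplit '\n' [] cs = h :: t := by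
    cases hs : pvSplit '\n' [] cs with
    | nil => exact absurd hs (pvSplit_ne_nil '\n' [] cs)
    | cons h t => exact ⟨h, t, rfl⟩
  rw [ht]
  simp only [List.map_cons]
  rw [pvJoin_cons_cons]
  rw [pvGLine_free field (fun c hc => (hfree c hc).1)]

theorem pvAn_tab (field cs : List Char)
    (hfree : ∀ c ∈ field, c ≠ '\t' ∧ c ≠ '\n') :
    pvAn (field ++ '\t' :: cs) = pvFCol field ++ '\t' :: pvAn cs := by
  unfold pvAn
  have hfree' : ∀ c ∈ field ++ ['\t'], c ≠ '\n' := by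
    intro c hc
    rcases List.mem_append.mp hc with h1 | h1
    · exact (hfree c h1).2
    · simp at h1; subst h1; decide
  have : field ++ '\t' :: cs = (field ++ ['\t']) ++ cs := by simp
  rw [this, pvSplit_prefix '\n' (field ++ ['\t']) hfree' [] cs, List.nil_append,
    pvSplit_modifyHead '\n' cs (field ++ ['\t'])]
  obtain ⟨h, t, ht⟩ : ∃ h t, pvSplit '\n' [] cs = h :: t := by
    cases hs : pvSplit '\n' [] cs with
    | nil => exact absurd hs (pvSplit_ne_nil '\n' [] cs)
    | cons h t => exact ⟨h, t, rfl⟩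
  rw [ht]
  simp only [List.modifyHead_cons, List.map_cons, List.append_assoc, List.singleton_append]
  have hg : pvGLine (field ++ '\t' :: h) = pvFCol field ++ '\t' :: pvGLine h := by
    unfold pvGLine
    rw [pvSplit_prefix '\t' field (fun c hc => (hfree c hc).1) [] ('\t' :: h)]
    simp only [List.nil_append, pvSplit, reduceIte]
    obtain ⟨h2, t2, ht2⟩ : ∃ h2 t2, pvSplit '\t' [] h = h2 :: t2 := by
      cases hs : pvSplit '\t' [] h with
      | nil => exact absurd hs (pvSplit_ne_nil '\t' [] h)
      | cons h2 t2 => exact ⟨h2, t2, rfl⟩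
    rw [ht2]
    simp only [List.map_cons]
    rw [pvJoin_cons_cons]
  rw [hg]
  have hj := pvJoin_head '\n' (pvFCol field ++ ['\t']) (pvGLine h) (t.map pvGLine)
  simp only [List.append_assoc, List.singleton_append] at hj
  rw [hj]

theorem pvFold_eq (cs : List Char) : ∀ (out field : List Char) (blank : Bool),
    (let st := cs.foldl pvAltStep (out, field, blank);
      st.1 ++ (if st.2.2 then pvDollars else st.2.1)) = out ++ pvGf field blank cs := by
  induction cs with
  | nil => intro out field blank; simp [pvGf]
  | cons c cs ih =>
    intro out field blank
    by_cases hc : c = '\t' ∨ c = '\n'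
    · simp only [List.foldl_cons, pvAltStep, if_pos hc, pvGf]
      rw [ih]
      simp [pvDollars]
    · simp only [List.foldl_cons, pvAltStep, if_neg hc, pvGf]
      rw [ih]

theorem pvMain (cs : List Char) : ∀ (field : List Char),
    (∀ c ∈ field, c ≠ '\t' ∧ c ≠ '\n') →
    pvGf field (field.all PySem.Chars.isspace) cs = pvAn (field ++ cs) := by
  induction cs with
  | nil =>
    intro field hfree
    rw [List.append_nil, pvAn_free field hfree]
    simp only [pvGf, pvFCol]
    by_cases h : field.all PySem.Chars.isspace = true
    · rw [h, if_pos rfl, if_pos ((pvStrip_nil_iff field).mpr h)]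
    · simp only [h]
      rw [if_neg (fun hs => h ((pvStrip_nil_iff field).mp hs))]
      simp
  | cons c cs ih =>
    intro field hfree
    by_cases hc : c = '\t' ∨ c = '\n'
    · simp only [pvGf, if_pos hc]
      have ihh := ih [] (by simp)
      simp only [List.all_nil, List.nil_append] at ihh
      rw [ihh]
      rcases hc with hc | hc <;> subst hc
      · rw [pvAn_tab field cs hfree]
        congr 1
        simp only [pvFCol]
        by_cases h : field.all PySem.Chars.isspace = true
        · rw [h, if_pos rfl, if_pos ((pvStrip_nil_iff field).mpr h)]
        · simp only [h]
          rw [if_neg (fun hs => h ((pvStrip_nil_iff field).mp hs))]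
          simp
      · rw [pvAn_newline field cs hfree]
        congr 1
        simp only [pvFCol]
        by_cases h : field.all PySem.Chars.isspace = true
        · rw [h, if_pos rfl, if_pos ((pvStrip_nil_iff field).mpr h)]
        · simp only [h]
          rw [if_neg (fun hs => h ((pvStrip_nil_iff field).mp hs))]
          simp
    · simp only [pvGf, if_neg hc]
      have hfree' : ∀ x ∈ field ++ [c], x ≠ '\t' ∧ x ≠ '\n' := by
        intro x hx
        rcases List.mem_append.mp hx with h1 | h1
        · exact hfree x h1
        · simp at h1; subst h1
          exact ⟨fun h => hc (Or.inl h), fun h => hc (Or.inr h)⟩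
      have := ih (field ++ [c]) hfree'
      rw [List.all_append] at this
      simpa using this

theorem pvPortA_eq (s : String) :
    preprocess_text_for_empty_columns s = String.mk (pvAn s.toList) := by
  have hcol : (fun (acc2 : List (List Char)) column =>
      if PySem.Chars.strip column = [] then acc2 ++ ["0 dollars".toList] else acc2 ++ [column])
      = (fun acc2 column => acc2 ++ [pvFCol column]) := by
    funext acc2 column
    unfold pvFCol pvDollars
    split <;> rfl
  have hline : (fun (acc : List (List Char)) line =>
      acc ++ [PySem.Chars.join ['\t'] ((PySem.Chars.splitOn line ['\t']).foldl
        (fun acc2 column => if PySem.Chars.strip column = [] then acc2 ++ ["0 dollars".toList]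
          else acc2 ++ [column]) [])])
      = (fun acc line => acc ++ [pvGLine line]) := by
    funext acc line
    rw [hcol, pvSplitOn_eq,
      PySem.List.foldl_append_singleton_eq_map pvFCol (pvSplit '\t' [] line) []]
    simp [pvGLine]
  unfold preprocess_text_for_empty_columns
  rw [hline, pvSplitOn_eq]
  show String.mk (PySem.Chars.join ['\n'] (List.foldl (fun acc line => acc ++ [pvGLine line]) []
    (pvSplit '\n' [] s.toList))) = String.mk (pvAn s.toList)
  rw [PySem.List.foldl_append_singleton_eq_map pvGLine (pvSplit '\n' [] s.toList) []]
  simp [pvAn]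


-- ===== VERDICT (by name: the statement is the Claim_ definition above) =====
theorem preprocess_text_for_empty_columns_spec : Claim_equal_preprocess_text_for_empty_columns := by
  intro s _
  unfold Spec_preprocess_text_for_empty_columns
  rw [pvPortA_eq]
  unfold preprocess_text_for_empty_columns_alt
  have hB := pvFold_eq s.toList [] [] true
  simp only [List.nil_append, pvDollars] at hB
  have hM := pvMain s.toList [] (by simp)
  simp only [List.all_nil, List.nil_append] at hM
  exact congrArg String.mk (hM.symm.trans hB.symm)
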